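-- pv_equiv track=rewrite | github.com/Wai-Theetat/OOD | Grader/02/2-4.py | hbd
-- ===== SOURCE A (Python) =====
-- def hbd(age):
--     for base in range(2, age):
--         s = ""
--         n = age
--         while n > 0:
--             s = str(n % base) + s
--             n //= base
--         if s == "20" or s == "21":
--             return f"saimai is just {s}, in base {base}!"
--     return "No suitable base found"
-- ===== SOURCE B (Python) =====
-- def hbd(age):
--     # age renders as "20" in base b iff age == 2*b with b >= 3; as "21" iff age == 2*b+1 with b >= 3.
--     if age % 2 == 0:
--         b = age // 2
--         if b >= 3:
--             return f"saimai is just 20, in base {b}!"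
--     else:
--         b = (age - 1) // 2
--         if b >= 3:
--             return f"saimai is just 21, in base {b}!"
--     return "No suitable base found"
-- ===== Notes on version B (the rewrite author's own statement) =====
-- stated objective: faster
-- what changed: Replaced A's linear search over all bases 2..age-1 (each with a digit-expansion loop) by the O(1) closed form: age reads as '20' in base b iff age = 2*b with b >= 3, and as '21' iff age = 2*b+1 with b >= 3, so parity of age picks the unique base directly.
import Mathlib
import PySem

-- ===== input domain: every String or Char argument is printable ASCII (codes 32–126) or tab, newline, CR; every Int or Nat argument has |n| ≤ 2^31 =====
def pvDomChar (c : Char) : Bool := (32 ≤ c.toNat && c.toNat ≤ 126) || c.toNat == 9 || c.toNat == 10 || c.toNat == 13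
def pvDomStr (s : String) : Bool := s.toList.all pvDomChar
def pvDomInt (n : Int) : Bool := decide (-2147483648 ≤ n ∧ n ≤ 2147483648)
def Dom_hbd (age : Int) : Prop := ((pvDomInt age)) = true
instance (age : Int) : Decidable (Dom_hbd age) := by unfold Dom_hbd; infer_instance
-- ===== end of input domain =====

-- B replaces A's search over all bases (with a digit-expansion loop per base) by the O(1)
-- closed form: "20" in base b means age = 2*b, "21" means age = 2*b+1, valid only for b ≥ 3.

-- ===== PORT A =====

-- inner 'while n > 0' loop of A; the '2 ≤ base' conjunct only makes the recursion total
-- (every call site has base ≥ 2, where it is exactly Python's loop)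
def hbdWhile (base : Int) (n : Int) (s : String) : String :=
  if h : 0 < n ∧ 2 ≤ base then
    hbdWhile base (PySem.Int.floordiv n base) (PySem.Int.toStr (PySem.Int.mod n base) ++ s)
  else s
termination_by n.toNat
decreasing_by
  have hb : (0:Int) < base := by omega
  have he : PySem.Int.floordiv n base = n / base := PySem.Int.floordiv_eq_ediv_of_pos hb
  have h1 : n / base < n := by
    rw [Int.ediv_lt_iff_lt_mul hb]
    nlinarith [h.1, h.2]
  have h2 : (0:Int) ≤ n / base := Int.ediv_nonneg (by omega) (by omega)
  rw [he]; omega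

-- 'for base in range(2, age): … return …' with early return, as structural recursion on the range
def hbdFor (age : Int) : List Int → String
  | [] => "No suitable base found"
  | base :: rest =>
    let s := hbdWhile base age ""
    if s = "20" ∨ s = "21" then
      "saimai is just " ++ s ++ ", in base " ++ PySem.Int.toStr base ++ "!"
    else hbdFor age rest

def hbd (age : Int) : String := hbdFor age (PySem.List.pyRange 2 age 1)

-- ===== PORT B =====
def hbd_alt (age : Int) : String :=
  if PySem.Int.mod age 2 = 0 then
    let b := PySem.Int.floordiv age 2
    if b ≥ 3 then "saimai is just 20, in base " ++ PySem.Int.toStr b ++ "!"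
    else "No suitable base found"
  else
    let b := PySem.Int.floordiv (age - 1) 2
    if b ≥ 3 then "saimai is just 21, in base " ++ PySem.Int.toStr b ++ "!"
    else "No suitable base found"

-- ===== PRECONDITION & SPEC =====
def Spec_hbd (age : Int) (out : String) : Prop := out = hbd_alt age
instance (age : Int) (out : String) : Decidable (Spec_hbd age out) := by unfold Spec_hbd; infer_instance

-- ===== CLAIM (what is proved, stated in full; the proofs are below) =====
def Claim_equal_hbd : Prop := ∀ (age : Int), Dom_hbd age → Spec_hbd age (hbd age)

-- ===== LEMMAS AND PROOFS =====

-- length facts about Nat.toDigits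
theorem pvTdcMono (b : Nat) : ∀ (f n : Nat) (l : List Char),
    l.length ≤ (Nat.toDigitsCore b f n l).length := by
  intro f
  induction f with
  | zero => intro n l; simp [Nat.toDigitsCore]
  | succ f ih =>
    intro n l
    simp only [Nat.toDigitsCore]
    split
    · simp
    · exact le_trans (by simp) (ih (n / b) (Nat.digitChar (n % b) :: l))

theorem pvTdcStrict (b : Nat) (f n : Nat) (l : List Char) (hf : 0 < f) :
    l.length < (Nat.toDigitsCore b f n l).length := by
  cases f with
  | zero => omega
  | succ f =>
    simp only [Nat.toDigitsCore]
    split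
    · simp
    · exact lt_of_lt_of_le (by simp) (pvTdcMono b f (n / b) (Nat.digitChar (n % b) :: l))

theorem pvToDigitsLen1 (n : Nat) : 1 ≤ (Nat.toDigits 10 n).length := by
  unfold Nat.toDigits
  exact pvTdcStrict 10 (n + 1) n [] (by omega)

theorem pvToDigitsLen2 (n : Nat) (h : 10 ≤ n) : 2 ≤ (Nat.toDigits 10 n).length := by
  unfold Nat.toDigits
  simp only [Nat.toDigitsCore]
  have hd : ¬ n / 10 = 0 := by omega
  simp only [hd, if_false]
  exact pvTdcStrict 10 n (n / 10) [Nat.digitChar (n % 10)] (by omega)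

theorem pvToDigitsSmall (n : Nat) (h : n < 10) : Nat.toDigits 10 n = [Nat.digitChar n] := by
  interval_cases n <;> decide

theorem pvToCharsNonneg (n : Int) (h : 0 ≤ n) :
    PySem.Int.toChars n = Nat.toDigits 10 n.toNat := by
  unfold PySem.Int.toChars
  simp [Int.not_lt.mpr h]

theorem pvToStrLen1 (n : Int) : 1 ≤ (PySem.Int.toStr n).toList.length := by
  rw [PySem.Int.toList_toStr]
  unfold PySem.Int.toChars
  split
  · simp
  · exact pvToDigitsLen1 _

-- toStr n = single digit char → n is that digit
theorem pvToStrDigit (n : Int) (h0 : 0 ≤ n) (c : Char) (d : Nat) (hd : d < 10)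
    (hc : Nat.digitChar d = c)
    (h : (PySem.Int.toStr n).toList = [c]) : n = (d : Int) := by
  rw [PySem.Int.toList_toStr, pvToCharsNonneg n h0] at h
  have hlt : n.toNat < 10 := by
    by_contra hge
    have := pvToDigitsLen2 n.toNat (by omega)
    rw [h] at this; simp at this
  rw [pvToDigitsSmall n.toNat hlt] at h
  have hdc : Nat.digitChar n.toNat = c := by simpa using h
  subst hc
  have : n.toNat = d := by
    interval_cases d <;> (interval_cases h' : n.toNat <;> first | rfl | (exfalso; exact absurd hdc (by decide)))
  omega

-- splitting a two-element concatenation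
theorem pvSplit2 {α : Type} (l1 l2 : List α) (a b : α) (h : l1 ++ l2 = [a, b])
    (h1 : 1 ≤ l1.length) (h2 : 1 ≤ l2.length) : l1 = [a] ∧ l2 = [b] := by
  have hlen := congrArg List.length h
  simp [List.length_append] at hlen
  match l1, l2 with
  | [x], [y] => simp at h; exact ⟨by rw [h.1], by rw [h.2]⟩
  | [], _ => simp at h1
  | _, [] => simp at h2
  | x :: y :: t, l2 => simp at hlen; omega
  | [x], y :: z :: t => simp at hlen; omega

-- unfolding lemmas for A's while loop
theorem pvWhileStep (base n : Int) (s : String) (h0 : 0 < n) (h2 : 2 ≤ base) :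
    hbdWhile base n s =
      hbdWhile base (PySem.Int.floordiv n base) (PySem.Int.toStr (PySem.Int.mod n base) ++ s) := by
  rw [hbdWhile]; simp [h0, h2]

theorem pvWhileStop (base n : Int) (s : String) (h0 : ¬ 0 < n) :
    hbdWhile base n s = s := by
  rw [hbdWhile]; simp [h0]

-- 0 < n < base : exactly one iteration
theorem pvWhileSmall (base n : Int) (s : String) (h2 : 2 ≤ base) (h0 : 0 < n) (hlt : n < base) :
    hbdWhile base n s = PySem.Int.toStr n ++ s := by
  have hb : (0:Int) < base := by omega
  have hq : PySem.Int.floordiv n base = 0 := by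
    rw [PySem.Int.floordiv_eq_iff_of_pos hb]; omega
  have hm : PySem.Int.mod n base = n := by
    have := PySem.Int.floordiv_mul_add_mod n base
    rw [hq] at this; omega
  rw [pvWhileStep base n s h0 h2, hq, hm, pvWhileStop]; omega

-- base ≤ n < base^2 : exactly two iterations
theorem pvWhileTwo (base n : Int) (s : String) (h2 : 2 ≤ base) (hge : base ≤ n)
    (hlt : n < base * base) :
    hbdWhile base n s =
      PySem.Int.toStr (PySem.Int.floordiv n base) ++ (PySem.Int.toStr (PySem.Int.mod n base) ++ s) := by
  have hb : (0:Int) < base := by omega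
  have hq1 : 1 ≤ PySem.Int.floordiv n base := by
    rw [PySem.Int.le_floordiv_iff_mul_le hb]; omega
  have hq2 : PySem.Int.floordiv n base < base := by
    rw [PySem.Int.floordiv_lt_iff_lt_mul hb]; exact hlt
  rw [pvWhileStep base n s (by omega) h2]
  exact pvWhileSmall base _ _ h2 (by omega) hq2

-- iterations never shorten s
theorem pvWhileLen (base n : Int) (s : String) :
    s.toList.length ≤ (hbdWhile base n s).toList.length := by
  rw [hbdWhile]
  split
  · rename_i h
    refine le_trans ?_ (pvWhileLen base (PySem.Int.floordiv n base)
      (PySem.Int.toStr (PySem.Int.mod n base) ++ s))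
    rw [String.toList_append, List.length_append]
    omega
  · exact le_rfl
termination_by n.toNat
decreasing_by
  rename_i h
  have hb : (0:Int) < base := by omega
  have he : PySem.Int.floordiv n base = n / base := PySem.Int.floordiv_eq_ediv_of_pos hb
  have h1 : n / base < n := by
    rw [Int.ediv_lt_iff_lt_mul hb]
    nlinarith [h.1, h.2]
  have h2 : (0:Int) ≤ n / base := Int.ediv_nonneg (by omega) (by omega)
  rw [he]; omega

-- base^2 ≤ n : at least three digit characters get prepended
theorem pvWhileBig (base n : Int) (s : String) (h2 : 2 ≤ base) (hge : base * base ≤ n) :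
    s.toList.length + 3 ≤ (hbdWhile base n s).toList.length := by
  have hb : (0:Int) < base := by omega
  have hn0 : 0 < n := by nlinarith
  have hq1 : base ≤ PySem.Int.floordiv n base := by
    rw [PySem.Int.le_floordiv_iff_mul_le hb]; exact hge
  set q1 := PySem.Int.floordiv n base with hq1d
  have hqq : 1 ≤ PySem.Int.floordiv q1 base := by
    rw [PySem.Int.le_floordiv_iff_mul_le hb]; omega
  rw [pvWhileStep base n s hn0 h2, pvWhileStep base q1 _ (by omega) h2,
      pvWhileStep base (PySem.Int.floordiv q1 base) _ (by omega) h2]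
  refine le_trans ?_ (pvWhileLen base _ _)
  rw [String.toList_append, List.length_append, String.toList_append, List.length_append,
      String.toList_append, List.length_append]
  have l1 := pvToStrLen1 (PySem.Int.mod n base)
  have l2 := pvToStrLen1 (PySem.Int.mod q1 base)
  have l3 := pvToStrLen1 (PySem.Int.mod (PySem.Int.floordiv q1 base) base)
  omega

-- the trigger predicate of A's if
def pvTrig (age base : Int) : Prop :=
  hbdWhile base age "" = "20" ∨ hbdWhile base age "" = "21"

-- forward: the closed-form bases do trigger, with the expected digit string
theorem pvTrig20 (age base : Int) (h3 : 3 ≤ base) (he : age = 2 * base) :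
    hbdWhile base age "" = "20" := by
  have hb : (0:Int) < base := by omega
  have hq : PySem.Int.floordiv age base = 2 := by
    rw [PySem.Int.floordiv_eq_iff_of_pos hb]; omega
  have hm : PySem.Int.mod age base = 0 := by
    have := PySem.Int.floordiv_mul_add_mod age base
    rw [hq] at this; omega
  rw [pvWhileTwo base age "" (by omega) (by omega) (by nlinarith), hq, hm]
  decide

theorem pvTrig21 (age base : Int) (h3 : 3 ≤ base) (he : age = 2 * base + 1) :
    hbdWhile base age "" = "21" := by
  have hb : (0:Int) < base := by omega
  have hq : PySem.Int.floordiv age base = 2 := by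
    rw [PySem.Int.floordiv_eq_iff_of_pos hb]; omega
  have hm : PySem.Int.mod age base = 1 := by
    have := PySem.Int.floordiv_mul_add_mod age base
    rw [hq] at this; omega
  rw [pvWhileTwo base age "" (by omega) (by omega) (by nlinarith), hq, hm]
  decide

-- backward: a trigger forces the closed form
theorem pvTrigChar (age base : Int) (h2 : 2 ≤ base) (hlt : base < age) (ht : pvTrig age base) :
    3 ≤ base ∧ (age = 2 * base ∨ age = 2 * base + 1) := by
  have hb : (0:Int) < base := by omega
  by_cases hc : age < base * base
  · have hw := pvWhileTwo base age "" h2 (by omega) hc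
    set q := PySem.Int.floordiv age base with hqd
    set r := PySem.Int.mod age base with hrd
    have hsum := PySem.Int.floordiv_mul_add_mod age base
    rw [← hqd, ← hrd] at hsum
    have hr0 : 0 ≤ r := PySem.Int.mod_nonneg age hb
    have hrb : r < base := PySem.Int.mod_lt age hb
    have hq0 : 0 ≤ q := by
      rw [hqd, PySem.Int.le_floordiv_iff_mul_le hb]; omega
    have hqb : q < base := by
      rw [hqd, PySem.Int.floordiv_lt_iff_lt_mul hb]; exact hc
    have hl1 := pvToStrLen1 q
    have hl2 := pvToStrLen1 r
    have key : ∀ (out : String) (c : Char), hbdWhile base age "" = out → out.toList = ['2', c] →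
        q = 2 ∧ (PySem.Int.toStr r).toList = [c] := by
      intro out c hEq hoc
      rw [hw] at hEq
      have hl : (PySem.Int.toStr q).toList ++ (PySem.Int.toStr r).toList = ['2', c] := by
        have := congrArg String.toList hEq
        rw [String.toList_append, String.toList_append, hoc] at this
        simpa using this
      obtain ⟨hl1', hl2'⟩ := pvSplit2 _ _ _ _ hl hl1 hl2
      exact ⟨pvToStrDigit q hq0 '2' 2 (by omega) (by decide) hl1', hl2'⟩
    rcases ht with ht | ht
    · obtain ⟨hqv, hrv⟩ := key "20" '0' ht (by decide)
      have hrv' : r = 0 := pvToStrDigit r hr0 '0' 0 (by omega) (by decide) hrv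
      rw [hqv] at hsum
      exact ⟨by omega, Or.inl (by omega)⟩
    · obtain ⟨hqv, hrv⟩ := key "21" '1' ht (by decide)
      have hrv' : r = 1 := pvToStrDigit r hr0 '1' 1 (by omega) (by decide) hrv
      rw [hqv] at hsum
      exact ⟨by omega, Or.inr (by omega)⟩
  · exfalso
    have hbig := pvWhileBig base age "" h2 (by omega)
    rcases ht with ht | ht <;> rw [ht] at hbig <;> simp at hbig

-- one step of A's for loop, as a plain equation
theorem pvForCons (age b : Int) (rest : List Int) :
    hbdFor age (b :: rest) =
      if hbdWhile b age "" = "20" ∨ hbdWhile b age "" = "21" then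
        "saimai is just " ++ hbdWhile b age "" ++ ", in base " ++ PySem.Int.toStr b ++ "!"
      else hbdFor age rest := rfl

-- loop when nothing triggers
theorem pvForNone (age : Int) (L : List Int) (h : ∀ b ∈ L, ¬ pvTrig age b) :
    hbdFor age L = "No suitable base found" := by
  induction L with
  | nil => rfl
  | cons b rest ih =>
    have hnb : ¬ (hbdWhile b age "" = "20" ∨ hbdWhile b age "" = "21") := h b (by simp)
    rw [pvForCons, if_neg hnb, ih (fun x hx => h x (by simp [hx]))]

-- loop when exactly one base triggers
theorem pvForUnique (age b0 : Int) (out : String) (L : List Int)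
    (hmem : b0 ∈ L)
    (huniq : ∀ b ∈ L, pvTrig age b → b = b0)
    (hs : hbdWhile b0 age "" = out)
    (hout : out = "20" ∨ out = "21") :
    hbdFor age L = "saimai is just " ++ out ++ ", in base " ++ PySem.Int.toStr b0 ++ "!" := by
  induction L with
  | nil => simp at hmem
  | cons b rest ih =>
    rw [pvForCons]
    by_cases hbb : b = b0
    · subst hbb
      rw [hs, if_pos hout]
    · have hnb : ¬ (hbdWhile b age "" = "20" ∨ hbdWhile b age "" = "21") :=
        fun hc => hbb (huniq b (by simp) hc)
      rw [if_neg hnb]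
      have hmem' : b0 ∈ rest := by
        rcases List.mem_cons.mp hmem with h | h
        · exact absurd h.symm hbb
        · exact h
      exact ih hmem' (fun x hx => huniq x (by simp [hx]))

-- ===== VERDICT (by name: the statement is the Claim_ definition above) =====
theorem hbd_spec : Claim_equal_hbd := by
  intro age _
  unfold Spec_hbd hbd hbd_alt
  have hmod : PySem.Int.mod age 2 = age % 2 := PySem.Int.mod_eq_emod_of_pos (by omega)
  have hdiv : ∀ x : Int, PySem.Int.floordiv x 2 = x / 2 :=
    fun x => PySem.Int.floordiv_eq_ediv_of_pos (by omega)
  by_cases hev : PySem.Int.mod age 2 = 0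
  · -- even age
    rw [if_pos hev]
    have hev' : age % 2 = 0 := by rw [← hmod]; exact hev
    by_cases hb3 : PySem.Int.floordiv age 2 ≥ 3
    · rw [if_pos hb3]
      set b0 := PySem.Int.floordiv age 2 with hb0d
      have hb0 : b0 = age / 2 := hdiv age
      have hage : age = 2 * b0 := by omega
      have hb3' : (3:Int) ≤ b0 := hb3
      have hmem : b0 ∈ PySem.List.pyRange 2 age 1 := by
        rw [PySem.List.mem_pyRange_one]; omega
      rw [pvForUnique age b0 "20" _ hmem
        (fun b hbmem ht => by
          rw [PySem.List.mem_pyRange_one] at hbmem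
          have := pvTrigChar age b hbmem.1 hbmem.2 ht
          omega)
        (pvTrig20 age b0 hb3' hage) (Or.inl rfl)]
      rfl
    · rw [if_neg hb3]
      refine pvForNone age _ (fun b hbmem ht => ?_)
      rw [PySem.List.mem_pyRange_one] at hbmem
      have h1 := pvTrigChar age b hbmem.1 hbmem.2 ht
      have h2 := hdiv age
      omega
  · -- odd age
    rw [if_neg hev]
    have hev' : age % 2 = 1 := by rw [hmod] at hev; omega
    by_cases hb3 : PySem.Int.floordiv (age - 1) 2 ≥ 3
    · rw [if_pos hb3]
      set b0 := PySem.Int.floordiv (age - 1) 2 with hb0d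
      have hb0 : b0 = (age - 1) / 2 := hdiv (age - 1)
      have hage : age = 2 * b0 + 1 := by omega
      have hb3' : (3:Int) ≤ b0 := hb3
      have hmem : b0 ∈ PySem.List.pyRange 2 age 1 := by
        rw [PySem.List.mem_pyRange_one]; omega
      rw [pvForUnique age b0 "21" _ hmem
        (fun b hbmem ht => by
          rw [PySem.List.mem_pyRange_one] at hbmem
          have := pvTrigChar age b hbmem.1 hbmem.2 ht
          omega)
        (pvTrig21 age b0 hb3' hage) (Or.inr rfl)]
      rfl
    · rw [if_neg hb3]
      refine pvForNone age _ (fun b hbmem ht => ?_)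
      rw [PySem.List.mem_pyRange_one] at hbmem
      have h1 := pvTrigChar age b hbmem.1 hbmem.2 ht
      have h2 := hdiv (age - 1)
      omega
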